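/-
  THE LAWS OF ONE REAL GROUP, PROVED: Q3's `Bits` (Vorbis/Bits.lean) satisfies what `Groups.Laws` asks of the field `Bits`.
  The pattern of the thirteen: each law is an instance of the group's two-address lemma `transfer`.

      Bits.ob1        `Bits f` contains OB1                                                       (`Laws.bits_ob1`)
      Bits.moves      `Group.Moves (fun Blk => Bits Blk len)`: through `*f = p`                    (`Laws.bits.moves`)
      Bits.carries    `Group.Carries (fun Blk => Bits Blk len)`: the coarse frame                  (`Laws.bits.carries`)

  `Moves`: `transfer` from the windows of the copy (`Move.objEq`), OB1 / OBR of the target from the `Move` itself, the input block by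
  `Move.sub`. `Carries`: the object is an allocated block, hence kept, hence `ObjSame`; then `frame` and `reblk`.
-/
import Vorbis.State.Copied
namespace Vorbis
open X86 X86.User Asan

namespace Bits
variable {Blk : Block → Prop} {len : Nat} {mem : Mem} {f : Nat}

/-- `Bits f` contains OB1. -/
theorem ob1 (h : Bits Blk len mem f) : Vorbis.OB1 Blk f := ⟨h.OB1, h.OB1a⟩

/-- **`Bits` follows the object through `*f = p`.** -/
theorem moves (len : Nat) : Group.Moves (fun Blk => Bits Blk len) := by
  intro Blk Blk' mem mem' p f hm h
  exact h.transfer (hm.objEq (by decide)) hm.ob1 hm.range (hm.sub _ h.S2)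

/-- **`Bits` has the coarse frame.** -/
theorem carries (len : Nat) : Group.Carries (fun Blk => Bits Blk len) := by
  intro Blk Blk' mem mem' f hk hB _ h
  have hr := h.OBR
  have hs : ObjSame f mem mem' := ObjSame.of_same (hk _ h.OB1).same (by omega)
  exact (h.frame hs).reblk (hB _ h.OB1) (hB _ h.S2)

/-- Both, as `Groups.Laws` wants them. -/
theorem good (len : Nat) : Group.Good (fun Blk => Bits Blk len) := ⟨moves len, carries len⟩

end Bits
end Vorbis
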